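-- pv_equiv track=rewrite | github.com/daniel-reich/ubiquitous-fiesta | qQnWXBsQaH73yY8r4_15.py | kempner
-- ===== SOURCE A (Python) =====
-- def kempner(value):
--     index = 1
--     factorial = 1
--     while True:
--         factorial = factorial * index
--         if factorial % value == 0:
--           return index
--         else:
--            index = index + 1
-- ===== SOURCE B (Python) =====
-- def _gcd(a, b):
--     while b:
--         a, b = b, a % b
--     return a
--
--
-- def kempner(value):
--     # shrink the still-uncancelled part of |value| instead of growing a factorial
--     remaining = abs(value)
--     index = 1
--     while remaining != 1:
--         index += 1
--         remaining //= _gcd(remaining, index)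
--     return index
-- ===== Notes on version B (the rewrite author's own statement) =====
-- stated objective: alternative
-- what changed: Instead of growing a factorial and testing divisibility each step, B keeps the still-uncancelled residual of |value| and divides out gcd(residual, index) each step, returning index once the residual is fully cancelled; all intermediate numbers stay bounded by |value| instead of becoming huge factorials.
-- outside the precondition, e.g. on kempner(0): A raises ZeroDivisionError, B does not finish within the time limit
import Mathlib
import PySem

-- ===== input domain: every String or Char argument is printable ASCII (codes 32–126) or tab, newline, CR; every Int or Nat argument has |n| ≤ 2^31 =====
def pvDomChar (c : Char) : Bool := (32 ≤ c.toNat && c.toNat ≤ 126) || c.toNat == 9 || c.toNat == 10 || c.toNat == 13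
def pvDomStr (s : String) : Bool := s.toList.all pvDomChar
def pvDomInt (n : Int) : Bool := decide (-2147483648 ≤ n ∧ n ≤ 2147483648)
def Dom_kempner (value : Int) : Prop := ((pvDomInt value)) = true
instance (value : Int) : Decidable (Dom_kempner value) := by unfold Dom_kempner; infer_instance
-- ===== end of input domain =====

-- B replaces A's growing factorial with a shrinking residual of |value| that is divided
-- by gcd(residual, index) each step, avoiding A's ever-larger big-integer products.

-- ===== PORT A =====
-- A's `while True` loop, fuel-bounded: for value ≠ 0 the loop provably stops within
-- |value| iterations (value divides |value|!), so the fuel is never exhausted on Pre_.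
def kempnerLoopA (value index factorial : Int) : Nat → Int
  | 0 => 0
  | fuel+1 =>
    let f := factorial * index
    if PySem.Int.mod f value = 0 then index
    else kempnerLoopA value (index + 1) f fuel

def kempner (value : Int) : Int := kempnerLoopA value 1 1 value.natAbs

-- ===== PORT B =====
-- termination measure for Source B's hand-written Euclid `_gcd`
lemma pvMod_natAbs_lt (a b : Int) (hb : ¬ b = 0) : (PySem.Int.mod a b).natAbs < b.natAbs := by
  rcases lt_or_gt_of_ne hb with h | h
  · have h1 := PySem.Int.mod_neg_bounds a h
    omega
  · have h1 := PySem.Int.mod_nonneg a h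
    have h2 := PySem.Int.mod_lt a h
    omega

-- Source B's `_gcd` (Euclid with Python's `%`)
def bGcd (a b : Int) : Int :=
  if h : b = 0 then a else bGcd b (PySem.Int.mod a b)
termination_by b.natAbs
decreasing_by exact pvMod_natAbs_lt a b h

-- Source B's `while remaining != 1` loop, fuel-bounded: for value ≠ 0 it provably stops
-- within |value| iterations, so the fuel is never exhausted on Pre_.
def kempnerLoopB (remaining index : Int) : Nat → Int
  | 0 => index
  | fuel+1 =>
    if remaining = 1 then index
    else
      let index' := index + 1
      kempnerLoopB (PySem.Int.floordiv remaining (bGcd remaining index')) index' fuel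

def kempner_alt (value : Int) : Int := kempnerLoopB |value| 1 value.natAbs

-- ===== PRECONDITION & SPEC =====
-- Pre_ excludes exactly value = 0, where A raises ZeroDivisionError (factorial % 0).
def Pre_kempner (value : Int) : Prop := value ≠ 0
instance (value : Int) : Decidable (Pre_kempner value) := by unfold Pre_kempner; infer_instance
def pvWitness_kempner : Int := 6

def Spec_kempner (value : Int) (out : Int) : Prop := out = kempner_alt value
instance (value : Int) (out : Int) : Decidable (Spec_kempner value out) := by unfold Spec_kempner; infer_instance

-- ===== CLAIM (what is proved, stated in full; the proofs are below) =====
def Claim_equal_kempner : Prop := ∀ (value : Int), Dom_kempner value → Pre_kempner value → Spec_kempner value (kempner value)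

-- ===== LEMMAS AND PROOFS =====

-- Source B's Euclid agrees with Nat.gcd on nonnegative arguments
lemma bGcd_eq (b a : Int) (ha : 0 ≤ a) (hb : 0 ≤ b) :
    bGcd a b = ((Nat.gcd a.toNat b.toNat : Nat) : Int) := by
  by_cases h : b = 0
  · subst h; rw [bGcd]; simp [Int.toNat_of_nonneg ha]
  · have hbpos : 0 < b := lt_of_le_of_ne hb (Ne.symm h)
    rw [bGcd]
    simp only [h, dite_false]
    have hm : PySem.Int.mod a b = a % b := PySem.Int.mod_eq_emod_of_pos hbpos
    have hmn : 0 ≤ a % b := Int.emod_nonneg a (by omega)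
    have ih := bGcd_eq (PySem.Int.mod a b) b hb (hm ▸ hmn)
    rw [ih, hm]
    congr 1
    have htn : (a % b).toNat = a.toNat % b.toNat := by
      have h2 : a % b = ((a.toNat % b.toNat : Nat) : Int) := by
        push_cast [Int.toNat_of_nonneg ha, Int.toNat_of_nonneg hb]
        rfl
      rw [h2, Int.toNat_natCast]
    rw [htn, Nat.gcd_comm a.toNat b.toNat, Nat.gcd_rec b.toNat a.toNat, Nat.gcd_comm]
termination_by b.natAbs
decreasing_by
  rcases lt_or_gt_of_ne h with hh | hh
  · have h1 := PySem.Int.mod_neg_bounds a hh; omega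
  · have h1 := PySem.Int.mod_nonneg a hh; have h2 := PySem.Int.mod_lt a hh; omega

-- the gcd step identity: dividing the residual v/gcd(v,F) by its gcd with m
-- cancels exactly the extra factor gcd(v, F*m)/gcd(v,F)
lemma gcd_mul_step (v F m : Nat) (hv : v ≠ 0) (hF : F ≠ 0) (hm : m ≠ 0) :
    Nat.gcd v (F * m) = Nat.gcd v F * Nat.gcd (v / Nat.gcd v F) m := by
  have hg : Nat.gcd v F ≠ 0 := Nat.gcd_ne_zero_left hv
  have hdvd : Nat.gcd v F ∣ v := Nat.gcd_dvd_left v F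
  have hq : v / Nat.gcd v F ≠ 0 := by
    have := Nat.le_of_dvd (Nat.pos_of_ne_zero hv) hdvd
    exact Nat.div_ne_zero_iff.mpr ⟨hg, this⟩
  have hFm : F * m ≠ 0 := mul_ne_zero hF hm
  have h2 : Nat.gcd (v / Nat.gcd v F) m ≠ 0 := Nat.gcd_ne_zero_left hq
  apply Nat.eq_of_factorization_eq (Nat.gcd_ne_zero_left hv) (mul_ne_zero hg h2)
  intro p
  rw [Nat.factorization_gcd hv hFm, Nat.factorization_mul hg h2, Nat.factorization_gcd hv hF,
      Nat.factorization_gcd hq hm, Nat.factorization_div hdvd, Nat.factorization_mul hF hm,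
      Nat.factorization_gcd hv hF]
  simp only [Finsupp.inf_apply, Finsupp.add_apply, Finsupp.tsub_apply]
  omega

-- the residual is 1 exactly when v already divides F
lemma resid_one_iff (v F : Nat) (hv : v ≠ 0) :
    v / Nat.gcd v F = 1 ↔ v ∣ F := by
  have hdvd : Nat.gcd v F ∣ v := Nat.gcd_dvd_left v F
  constructor
  · intro h
    have h2 := Nat.div_mul_cancel hdvd
    rw [h, one_mul] at h2
    exact h2 ▸ Nat.gcd_dvd_right v F
  · intro h
    rw [Nat.gcd_eq_left h, Nat.div_self (Nat.pos_of_ne_zero hv)]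

lemma loopA_run (value : Int) (K : Nat)
    (hK : value.natAbs ∣ Nat.factorial (K + 1))
    (hmin : ∀ j, j < K → ¬ value.natAbs ∣ Nat.factorial (j + 1)) :
    ∀ (fuel k : Nat), (∀ j, j < k → ¬ value.natAbs ∣ Nat.factorial (j + 1)) → K < k + fuel →
    kempnerLoopA value ((k : Int) + 1) ((Nat.factorial k : Nat) : Int) fuel = (K : Int) + 1 := by
  intro fuel
  induction fuel with
  | zero =>
    intro k hnot hfuel
    exact absurd hK (hnot K (by omega))
  | succ fuel ih =>
    intro k hnot hfuel
    rw [kempnerLoopA]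
    have hf : ((Nat.factorial k : Nat) : Int) * ((k : Int) + 1)
        = ((Nat.factorial (k + 1) : Nat) : Int) := by
      push_cast [Nat.factorial_succ]; ring
    by_cases hd : value.natAbs ∣ Nat.factorial (k + 1)
    · have hcond : PySem.Int.mod (((Nat.factorial k : Nat) : Int) * ((k : Int) + 1)) value = 0 := by
        rw [hf, PySem.Int.mod_eq_zero_iff_dvd]
        exact Int.natAbs_dvd.mp (Int.natCast_dvd_natCast.mpr hd)
      rw [if_pos hcond]
      have hkK : k = K := by
        rcases lt_trichotomy k K with h | h | h
        · exact absurd hd (hmin k h)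
        · exact h
        · exact absurd hK (hnot K h)
      rw [hkK]
    · have hcond : ¬ PySem.Int.mod (((Nat.factorial k : Nat) : Int) * ((k : Int) + 1)) value = 0 := by
        rw [hf, PySem.Int.mod_eq_zero_iff_dvd]
        intro hcon
        exact hd (Int.natCast_dvd_natCast.mp (Int.natAbs_dvd.mpr hcon))
      rw [if_neg hcond]
      have hnot' : ∀ j, j < k + 1 → ¬ value.natAbs ∣ Nat.factorial (j + 1) := by
        intro j hj
        rcases Nat.lt_succ_iff_lt_or_eq.mp hj with h | h
        · exact hnot j h
        · subst h; exact hd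
      have ihk := ih (k + 1) hnot' (by omega)
      have e1 : ((k : Int) + 1 + 1) = (((k + 1 : Nat) : Int) + 1) := by push_cast; ring
      rw [hf, e1]
      exact ihk

lemma loopB_run (v : Nat) (hv : v ≠ 0) (K : Nat)
    (hK : v ∣ Nat.factorial (K + 1))
    (hmin : ∀ j, j < K → ¬ v ∣ Nat.factorial (j + 1)) :
    ∀ (fuel k : Nat), (∀ j, j < k → ¬ v ∣ Nat.factorial (j + 1)) → K < k + fuel →
    kempnerLoopB ((v / Nat.gcd v (Nat.factorial (k + 1)) : Nat) : Int) ((k : Int) + 1) fuel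
      = (K : Int) + 1 := by
  intro fuel
  induction fuel with
  | zero =>
    intro k hnot hfuel
    exact absurd hK (hnot K (by omega))
  | succ fuel ih =>
    intro k hnot hfuel
    rw [kempnerLoopB]
    have hfac : Nat.factorial (k + 1) ≠ 0 := Nat.factorial_ne_zero _
    by_cases hd : v ∣ Nat.factorial (k + 1)
    · have hres : v / Nat.gcd v (Nat.factorial (k + 1)) = 1 := (resid_one_iff v _ hv).mpr hd
      rw [if_pos (by rw [hres]; norm_num)]
      have hkK : k = K := by
        rcases lt_trichotomy k K with h | h | h
        · exact absurd hd (hmin k h)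
        · exact h
        · exact absurd hK (hnot K h)
      rw [hkK]
    · have hres : v / Nat.gcd v (Nat.factorial (k + 1)) ≠ 1 := fun h => hd ((resid_one_iff v _ hv).mp h)
      rw [if_neg (by exact_mod_cast hres)]
      -- compute the new residual: gcd cancellation step
      have e2 : ((k : Int) + 1 + 1) = (((k + 2 : Nat) : Int)) := by push_cast; ring
      have hbg : bGcd ((v / Nat.gcd v (Nat.factorial (k + 1)) : Nat) : Int) ((k : Int) + 1 + 1)
          = ((Nat.gcd (v / Nat.gcd v (Nat.factorial (k + 1))) (k + 2) : Nat) : Int) := by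
        rw [e2]
        have := bGcd_eq ((k + 2 : Nat) : Int) ((v / Nat.gcd v (Nat.factorial (k + 1)) : Nat) : Int)
          (by positivity) (by positivity)
        simpa using this
      have hfd : PySem.Int.floordiv ((v / Nat.gcd v (Nat.factorial (k + 1)) : Nat) : Int)
          ((Nat.gcd (v / Nat.gcd v (Nat.factorial (k + 1))) (k + 2) : Nat) : Int)
          = (((v / Nat.gcd v (Nat.factorial (k + 1))) / Nat.gcd (v / Nat.gcd v (Nat.factorial (k + 1))) (k + 2) : Nat) : Int) :=
        PySem.Int.floordiv_natCast _ _
      have hstep : (v / Nat.gcd v (Nat.factorial (k + 1))) / Nat.gcd (v / Nat.gcd v (Nat.factorial (k + 1))) (k + 2)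
          = v / Nat.gcd v (Nat.factorial (k + 2)) := by
        have hmul : Nat.factorial (k + 2) = Nat.factorial (k + 1) * (k + 2) := by
          rw [Nat.factorial_succ (k + 1)]; ring
        rw [hmul, gcd_mul_step v (Nat.factorial (k + 1)) (k + 2) hv hfac (by omega),
            ← Nat.div_div_eq_div_mul]
      have hnot' : ∀ j, j < k + 1 → ¬ v ∣ Nat.factorial (j + 1) := by
        intro j hj
        rcases Nat.lt_succ_iff_lt_or_eq.mp hj with h | h
        · exact hnot j h
        · subst h; exact hd
      have ihk := ih (k + 1) hnot' (by omega)
      have e1 : ((k : Int) + 1 + 1) = (((k + 1 : Nat) : Int) + 1) := by push_cast; ring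
      simp only [hbg, hfd, hstep]
      have e3 : (k + 2 : Nat) = (k + 1) + 1 := by omega
      rw [e3, e1]
      exact ihk

-- ===== VERDICT (by name: the statement is the Claim_ definition above) =====
theorem kempner_spec : Claim_equal_kempner := by
  intro value _ hpre
  unfold Spec_kempner
  have hv : value.natAbs ≠ 0 := by simpa [Int.natAbs_eq_zero] using hpre
  have hex : ∃ n, value.natAbs ∣ Nat.factorial (n + 1) :=
    ⟨value.natAbs - 1, by
      have : value.natAbs - 1 + 1 = value.natAbs := by omega
      rw [this]
      exact Nat.dvd_factorial (by omega) le_rfl⟩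
  set K := Nat.find hex with hKdef
  have hK := Nat.find_spec hex
  have hmin : ∀ j, j < K → ¬ value.natAbs ∣ Nat.factorial (j + 1) :=
    fun j hj => Nat.find_min hex hj
  have hKlt : K < value.natAbs := by
    have h1 : K ≤ value.natAbs - 1 := Nat.find_le (by
      have : value.natAbs - 1 + 1 = value.natAbs := by omega
      rw [this]
      exact Nat.dvd_factorial (by omega) le_rfl)
    omega
  have hA : kempner value = (K : Int) + 1 := by
    have h := loopA_run value K hK hmin value.natAbs 0 (by omega) (by omega)
    norm_num [Nat.factorial] at h
    rw [kempner]
    exact h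
  have hB : kempner_alt value = (K : Int) + 1 := by
    have h := loopB_run value.natAbs hv K hK hmin value.natAbs 0 (by omega) (by omega)
    norm_num [Nat.factorial, Nat.gcd_one_right] at h
    rw [kempner_alt]
    exact h
  rw [hA, hB]
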